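-- pv_equiv track=rewrite | github.com/schreiberbrett/graph-theory | src/settools.py | unriffle
-- ===== SOURCE A (Python) =====
-- from typing import Generic, Iterable, TypeVar, Hashable, Set, List, Tuple
--
-- A = TypeVar('A', bound=Hashable)
--
-- def unriffle(x: Set[A]) -> List[Tuple[Set[A], Set[A]]]:
-- 	def go(x: Set[A]) -> List[Tuple[Set[A], Set[A]]]:
-- 		if len(x) == 0:
-- 			return [(set(), set())]
--
-- 		first = x.pop()
-- 		rest = x
--
-- 		result: List[Tuple[Set[A], Set[A]]] = []
--
-- 		for l_rec, r_rec in go(rest):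
-- 			l1 = l_rec.copy()
-- 			l2 = l_rec.copy()
-- 			r1 = r_rec.copy()
-- 			r2 = r_rec.copy()
--
-- 			l1.add(first)
-- 			r2.add(first)
--
-- 			result.append((l1, r1))
-- 			result.append((l2, r2))
--
-- 		return result
--
-- 	return go(x.copy())
-- ===== SOURCE B (Python) =====
-- def unriffle(x):
--     y = x.copy()
--     elems = []
--     while y:
--         elems.append(y.pop())
--
--     def pair(i, mask):
--         if i == len(elems):
--             return (set(), set())
--         l, r = pair(i + 1, mask // 2)
--         (r if mask % 2 else l).add(elems[i])
--         return (l, r)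
--
--     return [pair(0, mask) for mask in range(2 ** len(elems))]
-- ===== Notes on version B (the rewrite author's own statement) =====
-- stated objective: alternative
-- what changed: Replaces the recursive copy-and-double construction over the set with a direct enumeration of the bitmasks 0..2^n-1, building each (left,right) pair from the bits of its mask (bit k = side of the k-th popped element).
import Mathlib
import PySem

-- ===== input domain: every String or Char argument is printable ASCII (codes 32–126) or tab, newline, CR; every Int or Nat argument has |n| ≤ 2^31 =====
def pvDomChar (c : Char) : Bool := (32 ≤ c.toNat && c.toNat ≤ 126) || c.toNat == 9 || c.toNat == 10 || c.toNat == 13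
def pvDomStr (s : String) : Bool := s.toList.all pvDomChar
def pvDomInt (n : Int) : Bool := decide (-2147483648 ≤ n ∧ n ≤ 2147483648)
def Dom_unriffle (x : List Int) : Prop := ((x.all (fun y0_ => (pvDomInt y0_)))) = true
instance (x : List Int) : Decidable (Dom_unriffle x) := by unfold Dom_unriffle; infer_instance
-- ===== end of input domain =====

-- B enumerates the 2^n bitmasks directly instead of A's recursive copy-and-double; same cost, different shape.

-- ===== PORT A =====
-- A's inner 'go': pop an element (head of the set's element list), recurse on the rest,
-- and for each recursive pair append the left-extended then right-extended copies.
def unriffleGo : List Int → List (List Int × List Int)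
  | [] => [([], [])]
  | first :: rest =>
    (unriffleGo rest).foldl
      (fun result p =>
        result ++ [(PySem.Set.add p.1 first, p.2), (p.1, PySem.Set.add p.2 first)]) []

def unriffle (x : List Int) : List (List Int × List Int) := unriffleGo x

-- ===== PORT B =====
-- B's inner 'pair': the k-th remaining element goes right iff bit k of the mask is set.
-- (Source B adds to a Python set the element cannot already contain — under Pre_ the elements are
-- distinct — so the add is an append here; set element order is not observable in Python.)
def unrifflePair : List Int → Nat → List Int × List Int
  | [], _ => ([], [])
  | e :: rest, mask =>
    let p := unrifflePair rest (mask / 2)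
    if mask % 2 = 1 then (p.1, p.2 ++ [e]) else (p.1 ++ [e], p.2)

def unriffle_alt (x : List Int) : List (List Int × List Int) :=
  (List.range (2 ^ x.length)).map (unrifflePair x)

-- ===== PRECONDITION & SPEC =====
-- The Python parameter is a set, so its List Int model holds distinct elements.
def Pre_unriffle (x : List Int) : Prop := x.Nodup
instance (x : List Int) : Decidable (Pre_unriffle x) := by unfold Pre_unriffle; infer_instance
def pvWitness_unriffle : List Int := ([1, 2, 3])

def Spec_unriffle (x : List Int) (out : List (List Int × List Int)) : Prop := out = unriffle_alt x
instance (x : List Int) (out : List (List Int × List Int)) : Decidable (Spec_unriffle x out) := by unfold Spec_unriffle; infer_instance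

-- ===== CLAIM (what is proved, stated in full; the proofs are below) =====
def Claim_equal_unriffle : Prop := ∀ (x : List Int), Dom_unriffle x → Pre_unriffle x → Spec_unriffle x (unriffle x)

-- ===== LEMMAS AND PROOFS =====

-- Both components of B's pair draw their elements from the input list.
theorem unrifflePair_subset (xs : List Int) (m : Nat) :
    (∀ a ∈ (unrifflePair xs m).1, a ∈ xs) ∧ (∀ a ∈ (unrifflePair xs m).2, a ∈ xs) := by
  induction xs generalizing m with
  | nil => simp [unrifflePair]
  | cons e rest ih =>
    have h := ih (m / 2)
    unfold unrifflePair
    split_ifs <;> constructor <;> intro a ha <;> simp_all <;> tauto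

theorem pvRangeTwoMul (m : Nat) :
    List.range (2 * m) = (List.range m).flatMap (fun i => [2 * i, 2 * i + 1]) := by
  induction m with
  | zero => rfl
  | succ m ih =>
    have h2 : 2 * (m + 1) = (2 * m + 1) + 1 := by omega
    rw [h2, List.range_succ, List.range_succ, ih, List.range_succ]
    simp

theorem unrifflePair_even (f : Int) (rest : List Int) (i : Nat) :
    unrifflePair (f :: rest) (2 * i) =
      ((unrifflePair rest i).1 ++ [f], (unrifflePair rest i).2) := by
  have h1 : 2 * i % 2 = 0 := by omega
  have h2 : 2 * i / 2 = i := by omega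
  simp [unrifflePair, h1, h2]

theorem unrifflePair_odd (f : Int) (rest : List Int) (i : Nat) :
    unrifflePair (f :: rest) (2 * i + 1) =
      ((unrifflePair rest i).1, (unrifflePair rest i).2 ++ [f]) := by
  have h1 : (2 * i + 1) % 2 = 1 := by omega
  have h2 : (2 * i + 1) / 2 = i := by omega
  simp [unrifflePair, h1, h2]

theorem unriffleGo_eq (x : List Int) (hx : x.Nodup) :
    unriffleGo x = (List.range (2 ^ x.length)).map (unrifflePair x) := by
  induction x with
  | nil => decide
  | cons f rest ih =>
    have hf : f ∉ rest := (List.nodup_cons.mp hx).1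
    have hrest : rest.Nodup := (List.nodup_cons.mp hx).2
    simp only [unriffleGo]
    rw [PySem.List.foldl_append_eq_flatMap, List.nil_append, ih hrest]
    have hlen : (f :: rest).length = rest.length + 1 := rfl
    rw [hlen, pow_succ, mul_comm, pvRangeTwoMul]
    rw [List.flatMap_map, List.map_flatMap]
    apply List.flatMap_congr
    intro i _
    have hs := unrifflePair_subset rest i
    have hl : f ∉ (unrifflePair rest i).1 := fun h => hf (hs.1 f h)
    have hr : f ∉ (unrifflePair rest i).2 := fun h => hf (hs.2 f h)
    simp [unrifflePair_even, unrifflePair_odd,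
      PySem.Set.add_of_not_mem hl, PySem.Set.add_of_not_mem hr]

-- ===== VERDICT (by name: the statement is the Claim_ definition above) =====
theorem unriffle_spec : Claim_equal_unriffle := by
  intro x _ hpre
  unfold Spec_unriffle unriffle unriffle_alt
  exact unriffleGo_eq x hpre
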